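-- pv_equiv track=rewrite | github.com/kuznetsovvj/education | algorithms/codeforces/1660d.py | solution
-- ===== SOURCE A (Python) =====
-- def solution(seq):
--     tpl = []
--     l = -1
--     fuz, luz = -1, -1
--     for idx, item in enumerate(seq):
--         if item == 0:
--             if l != -1:
--                 tpl.append((l, idx - 1)) # добавляем в список проверок отрезок
--             if fuz != -1:
--                 tpl.append((fuz + 1, idx - 1)) # до первого отрицательного
--             if luz != -1:
--                 tpl.append((l, luz - 1)) # до последнего отрицательного
--             l, fuz, luz = -1, -1, -1
--         else:
--             if l == -1:
--                 l = idx
--             if item < 0: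
--                 if fuz == -1:
--                     fuz = idx
--                 luz = idx
--     if l != -1:
--         tpl.append((l, len(seq) - 1))
--     if fuz != -1:
--         tpl.append((fuz + 1, len(seq) - 1))
--     if luz != -1:
--         tpl.append((l, luz - 1))
--
--     res = float('-inf')
--     max_l, max_r = -1, -1
--     for l, r in tpl:
--         crt = 1
--         for i in range(l, r+1):
--             crt *= seq[i]
--         if crt > res:
--             res = crt
--             max_l = l
--             max_r = r
--     if res < 1:
--         return f"{len(seq)} 0"
--
--     return f"{max_l} {len(seq) - max_r - 1}"
-- ===== SOURCE B (Python) =====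
-- def _scan(seq, i):
--     # one pass over the zero-free run starting at i, maintaining running prefix
--     # products: p = product so far, fprod = product up to AND including the first
--     # negative, lprod = product strictly BEFORE the most recent negative.
--     n = len(seq)
--     j, p, fi, fprod, li, lprod = i, 1, -1, 1, -1, 1
--     while j < n and seq[j] != 0:
--         x = seq[j]
--         if x < 0:
--             lprod = p
--             li = j
--         p *= x
--         if x < 0 and fi == -1:
--             fi = j
--             fprod = p
--         j += 1
--     return j, p, fi, fprod, li, lprod
--
--
-- def _consider(best, c):
--     if best is None or best[0] < c[0]:
--         return c
--     return best
--
--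
-- def solution(seq):
--     n = len(seq)
--     best = None
--     i = 0
--     while i < n:
--         if seq[i] == 0:
--             i += 1
--             continue
--         j, p, fi, fprod, li, lprod = _scan(seq, i)
--         best = _consider(best, (p, i, j - 1))
--         if fi != -1:
--             best = _consider(best, (p // fprod, fi + 1, j - 1))
--             best = _consider(best, (lprod, i, li - 1))
--         i = j
--     if best is None or best[0] < 1:
--         return f"{n} 0"
--     return f"{best[1]} {n - best[2] - 1}"
-- ===== Notes on version B (the rewrite author's own statement) =====
-- stated objective: alternative
-- what changed: A is two-phase: a state machine collects a list of candidate index intervals and a second loop recomputes each interval's product by re-scanning seq index by index; B is a single fused index scan that never builds an interval list and never re-scans: it maintains running prefix products (whole run, up to the first negative, strictly before the last negative), derives the trimmed candidates' products by one exact integer division, and folds the running best inline.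
import Mathlib
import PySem

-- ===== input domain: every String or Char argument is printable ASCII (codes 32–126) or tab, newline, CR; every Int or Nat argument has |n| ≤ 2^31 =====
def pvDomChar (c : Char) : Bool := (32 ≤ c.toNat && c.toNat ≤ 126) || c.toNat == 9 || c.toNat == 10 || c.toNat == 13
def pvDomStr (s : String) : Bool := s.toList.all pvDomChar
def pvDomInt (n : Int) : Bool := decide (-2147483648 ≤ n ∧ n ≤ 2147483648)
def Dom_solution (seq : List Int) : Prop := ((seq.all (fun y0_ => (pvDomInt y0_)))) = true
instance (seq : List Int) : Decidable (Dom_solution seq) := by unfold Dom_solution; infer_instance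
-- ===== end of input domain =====

-- B replaces A's two-phase scheme (state machine collecting candidate intervals, then a
-- product re-scan per interval) by one fused index scan keeping running prefix products,
-- deriving each trimmed candidate's product by one exact division; same value, similar cost.

-- ===== PORT A =====
-- the three conditional appends A performs at a zero / at the end, in A's order
def pvACands (l fuz luz idx : Int) : List (Int × Int) :=
  (if l ≠ -1 then [(l, idx - 1)] else []) ++
  (if fuz ≠ -1 then [(fuz + 1, idx - 1)] else []) ++
  (if luz ≠ -1 then [(l, luz - 1)] else [])

-- body of A's first loop (state: tpl, l, fuz, luz)
def solutionStep (st : (List (Int × Int)) × Int × Int × Int) (p : Int × Int) :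
    (List (Int × Int)) × Int × Int × Int :=
  match st, p with
  | (tpl, l, fuz, luz), (idx, item) =>
    if item = 0 then
      (tpl ++ pvACands l fuz luz idx, -1, -1, -1)
    else
      let l' := if l = -1 then idx else l
      let fuz' := if item < 0 then (if fuz = -1 then idx else fuz) else fuz
      let luz' := if item < 0 then idx else luz
      (tpl, l', fuz', luz')

-- A's first loop + the three appends after it
def solutionTpl (seq : List Int) : List (Int × Int) :=
  let st := (PySem.List.enumerate seq 0).foldl solutionStep ([], -1, -1, -1)
  st.1 ++ pvACands st.2.1 st.2.2.1 st.2.2.2 (seq.length : Int)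

-- crt = product of seq[i] for i in range(l, r+1)
def solutionCrt (seq : List Int) (l r : Int) : Int :=
  (PySem.List.pyRange l (r + 1) 1).foldl (fun c i => c * PySem.List.pyGetD seq i 0) 1

-- body of A's second loop; res = none plays float('-inf')
def solutionSel (seq : List Int) (acc : Option Int × Int × Int) (lr : Int × Int) :
    Option Int × Int × Int :=
  let crt := solutionCrt seq lr.1 lr.2
  match acc.1 with
  | none => (some crt, lr.1, lr.2)
  | some v => if v < crt then (some crt, lr.1, lr.2) else acc

def solution (seq : List Int) : String :=
  let n : Int := seq.length
  let fin := (solutionTpl seq).foldl (solutionSel seq) (none, -1, -1)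
  match fin.1 with
  | none => PySem.Int.toStr n ++ " 0"
  | some res =>
    if res < 1 then PySem.Int.toStr n ++ " 0"
    else PySem.Int.toStr fin.2.1 ++ " " ++ PySem.Int.toStr (n - fin.2.2 - 1)

-- ===== PORT B =====
-- _consider: keep the best (product, l, r), replacing only on a strictly larger product
def consider (best : Option (Int × Int × Int)) (c : Int × Int × Int) :
    Option (Int × Int × Int) :=
  match best with
  | none => some c
  | some b => if b.1 < c.1 then some c else some b

-- _scan's inner while loop: one pass over the zero-free run starting at j, maintaining
-- p (running product), fi/fprod (first negative: index, product up to AND including it),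
-- li/lprod (last negative so far: index, product strictly before it).
-- fuel (enough iterations, seq.length - j at entry) only makes the recursion structural.
def scanSeg (seq : List Int) : Nat → Nat → Int → Int → Int → Int → Int →
    Nat × Int × Int × Int × Int × Int
  | 0, j, p, fi, fprod, li, lprod => (j, p, fi, fprod, li, lprod)
  | fuel + 1, j, p, fi, fprod, li, lprod =>
    if j < seq.length ∧ seq.getD j 0 ≠ 0 then
      let x := seq.getD j 0
      let li' := if x < 0 then (j : Int) else li
      let lprod' := if x < 0 then p else lprod
      let p' := p * x
      let fi' := if x < 0 ∧ fi = -1 then (j : Int) else fi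
      let fprod' := if x < 0 ∧ fi = -1 then p' else fprod
      scanSeg seq fuel (j + 1) p' fi' fprod' li' lprod'
    else (j, p, fi, fprod, li, lprod)

-- B's outer while loop (fuel: enough iterations, seq.length at entry)
def solveFrom (seq : List Int) : Nat → Nat → Option (Int × Int × Int) →
    Option (Int × Int × Int)
  | 0, _, best => best
  | fuel + 1, i, best =>
    if i < seq.length then
      if seq.getD i 0 = 0 then solveFrom seq fuel (i + 1) best
      else
        let r := scanSeg seq (seq.length - i) i 1 (-1) 1 (-1) 1
        let b1 := consider best (r.2.1, (i : Int), (r.1 : Int) - 1)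
        let b2 :=
          if r.2.2.1 ≠ -1 then
            consider
              (consider b1 (PySem.Int.floordiv r.2.1 r.2.2.2.1, r.2.2.1 + 1, (r.1 : Int) - 1))
              (r.2.2.2.2.2, (i : Int), r.2.2.2.2.1 - 1)
          else b1
        solveFrom seq fuel r.1 b2
    else best

def solution_alt (seq : List Int) : String :=
  let n : Int := seq.length
  match solveFrom seq seq.length 0 none with
  | none => PySem.Int.toStr n ++ " 0"
  | some b =>
    if b.1 < 1 then PySem.Int.toStr n ++ " 0"
    else PySem.Int.toStr b.2.1 ++ " " ++ PySem.Int.toStr (n - b.2.2 - 1)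

-- ===== PRECONDITION & SPEC =====
def Spec_solution (seq : List Int) (out : String) : Prop := out = solution_alt seq
instance (seq : List Int) (out : String) : Decidable (Spec_solution seq out) := by
  unfold Spec_solution; infer_instance

-- ===== CLAIM (what is proved, stated in full; the proofs are below) =====
def Claim_equal_solution : Prop := ∀ (seq : List Int), Dom_solution seq → Spec_solution seq (solution seq)


-- ===== LEMMAS AND PROOFS =====

-- positions of the negative elements of a run (local indices, ascending)
def negPos : List Int → List Nat
  | [] => []
  | x :: t => (if x < 0 then [0] else []) ++ (negPos t).map (· + 1)

-- the candidate triples (product, l, r) B emits for the run vals starting at index s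
def segCandsB (s : Nat) (vals : List Int) : List (Int × Int × Int) :=
  (vals.prod, (s : Int), (s : Int) + (vals.length : Int) - 1) ::
  (match negPos vals with
   | [] => []
   | k :: t =>
     [(PySem.Int.floordiv vals.prod ((vals.take (k + 1)).prod),
        (s : Int) + (k : Int) + 1, (s : Int) + (vals.length : Int) - 1),
      ((vals.take (((k :: t).getLast?).getD 0)).prod,
        (s : Int), (s : Int) + ((((k :: t).getLast?).getD 0 : Nat) : Int) - 1)])

-- the same index pairs, Int-started (what A records)
def segPairsI (s : Int) (vals : List Int) : List (Int × Int) :=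
  (s, s + (vals.length : Int) - 1) ::
  (match negPos vals with
   | [] => []
   | k :: t =>
     [(s + (k : Int) + 1, s + (vals.length : Int) - 1),
      (s, s + ((((k :: t).getLast?).getD 0 : Nat) : Int) - 1)])

theorem map_snd_segCandsB (s : Nat) (vals : List Int) :
    (segCandsB s vals).map (fun c => c.2) = segPairsI (s : Int) vals := by
  cases hneg : negPos vals <;> simp [segCandsB, segPairsI, hneg]

theorem takeWhile_pos (seq : List Int) (i : Nat) (hi : i < seq.length)
    (hz : seq.getD i 0 ≠ 0) :
    0 < ((seq.drop i).takeWhile (fun v => v != 0)).length := by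
  have hd : seq.drop i = seq[i] :: seq.drop (i + 1) := List.drop_eq_getElem_cons hi
  have hx : seq[i] ≠ 0 := by rwa [List.getD_eq_getElem _ _ hi] at hz
  rw [hd, List.takeWhile_cons]
  simp [hx]

-- the maximal zero-free runs of seq from index i on (start index, values)
def segsFrom (seq : List Int) (i : Nat) : List (Nat × List Int) :=
  if hi : i < seq.length then
    if hz : seq.getD i 0 = 0 then segsFrom seq (i + 1)
    else
      (i, (seq.drop i).takeWhile (fun v => v != 0)) ::
        segsFrom seq (i + ((seq.drop i).takeWhile (fun v => v != 0)).length)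
  else []
termination_by seq.length - i
decreasing_by
  · omega
  · have := takeWhile_pos seq i hi hz; omega

def candFlat (seq : List Int) : List (Int × Int × Int) :=
  (segsFrom seq 0).flatMap (fun sv => segCandsB sv.1 sv.2)

theorem negPos_lt_length {vals : List Int} {k : Nat} (h : k ∈ negPos vals) :
    k < vals.length := by
  induction vals generalizing k with
  | nil => simp [negPos] at h
  | cons x t ih =>
    simp only [negPos, List.mem_append, List.mem_map] at h
    rcases h with h | ⟨m, hm, rfl⟩
    · split at h <;> simp_all
    · have := ih hm
      simp only [List.length_cons]
      omega

theorem negPos_concat (cur : List Int) (x : Int) :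
    negPos (cur ++ [x]) = negPos cur ++ (if x < 0 then [cur.length] else []) := by
  induction cur with
  | nil => by_cases hx : x < 0 <;> simp [negPos, hx]
  | cons y t ih =>
    simp only [List.cons_append, negPos, ih, List.map_append, List.append_assoc,
      List.length_cons]
    by_cases hx : x < 0 <;> simp [hx]

theorem prodFold (l : List Int) : l.foldl (fun p v => p * v) 1 = l.prod :=
  (List.prod_eq_foldl).symm

-- ===== A-side: the state machine mirrors run segmentation =====

-- A's (l, fuz, luz) as functions of the segmentation state (start, cur)
def aL (start : Int) (cur : List Int) : Int := if cur = [] then -1 else start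

def aFuz (start : Int) (cur : List Int) : Int :=
  match negPos cur with
  | [] => -1
  | k :: _ => start + (k : Int)

def aLuz (start : Int) (cur : List Int) : Int :=
  match negPos cur with
  | [] => -1
  | k :: t => start + ((((k :: t).getLast?).getD 0 : Nat) : Int)

def segFlat (segs : List (Int × List Int)) : List (Int × Int) :=
  segs.flatMap (fun p => segPairsI p.1 p.2)

-- B-old-style segmentation state machine, used only as a proof intermediate
def altStep (st : (List (Int × List Int)) × Int × List Int) (p : Int × Int) :
    (List (Int × List Int)) × Int × List Int :=
  match st, p with
  | (segs, start, cur), (i, x) =>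
    if x = 0 then
      ((if cur ≠ [] then segs ++ [(start, cur)] else segs), i + 1, ([] : List Int))
    else
      (segs, start, cur ++ [x])

def finishSegs (st : (List (Int × List Int)) × Int × List Int) : List (Int × List Int) :=
  if st.2.2 ≠ [] then st.1 ++ [(st.2.1, st.2.2)] else st.1

def altSegs (seq : List Int) : List (Int × List Int) :=
  finishSegs ((PySem.List.enumerate seq 0).foldl altStep ([], 0, []))

-- A's loop state as the mirror of the segmentation state
def aMirror (st : (List (Int × List Int)) × Int × List Int) :
    (List (Int × Int)) × Int × Int × Int :=
  (segFlat st.1, aL st.2.1 st.2.2, aFuz st.2.1 st.2.2, aLuz st.2.1 st.2.2)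

-- a recorded run is a nonempty, zero-free, in-bounds slice of seq
def SegOK (seq : List Int) (p : Int × List Int) : Prop :=
  0 ≤ p.1 ∧ p.2 ≠ [] ∧ (∀ v ∈ p.2, v ≠ 0) ∧
    p.2 = (seq.drop p.1.toNat).take p.2.length ∧ p.1.toNat + p.2.length ≤ seq.length

-- invariant of the segmentation loop after k elements
def InvS (seq : List Int) (k : Nat) (st : (List (Int × List Int)) × Int × List Int) : Prop :=
  0 ≤ st.2.1 ∧ st.2.1.toNat + st.2.2.length = k ∧ (∀ v ∈ st.2.2, v ≠ 0) ∧
    st.2.2 = (seq.drop st.2.1.toNat).take st.2.2.length ∧ k ≤ seq.length ∧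
    ∀ p ∈ st.1, SegOK seq p

theorem InvS_mk (seq : List Int) (k : Nat) (segs : List (Int × List Int)) (start : Int)
    (cur : List Int) :
    InvS seq k (segs, start, cur) ↔
      (0 ≤ start ∧ start.toNat + cur.length = k ∧ (∀ v ∈ cur, v ≠ 0) ∧
        cur = (seq.drop start.toNat).take cur.length ∧ k ≤ seq.length ∧
        ∀ p ∈ segs, SegOK seq p) := Iff.rfl

theorem SegOK_mk (seq : List Int) (s : Int) (vs : List Int) :
    SegOK seq (s, vs) ↔
      (0 ≤ s ∧ vs ≠ [] ∧ (∀ v ∈ vs, v ≠ 0) ∧ vs = (seq.drop s.toNat).take vs.length ∧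
        s.toNat + vs.length ≤ seq.length) := Iff.rfl

theorem aL_nil (s : Int) : aL s [] = -1 := rfl
theorem aFuz_nil (s : Int) : aFuz s [] = -1 := rfl
theorem aLuz_nil (s : Int) : aLuz s [] = -1 := rfl

-- closing a run: A's three conditional appends are exactly the run's index pairs
theorem pvACands_close (start : Int) (cur : List Int) (idx : Int) (h0 : 0 ≤ start)
    (hidx : idx = start + cur.length) :
    pvACands (aL start cur) (aFuz start cur) (aLuz start cur) idx =
      if cur = [] then [] else segPairsI start cur := by
  by_cases hc : cur = []
  · subst hc
    simp [pvACands, aL_nil, aFuz_nil, aLuz_nil]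
  · have hl : aL start cur = start := by simp [aL, hc]
    have h1 : ¬ start = -1 := by omega
    rw [if_neg hc]
    rcases hn : negPos cur with _ | ⟨k, t⟩
    · have hf : aFuz start cur = -1 := by simp [aFuz, hn]
      have hlz : aLuz start cur = -1 := by simp [aLuz, hn]
      simp only [pvACands, segPairsI, hn, hf, hlz, hl, hidx, ne_eq, h1,
        not_false_eq_true, if_true, not_true_eq_false, if_false, List.append_nil]
    · have hf : aFuz start cur = start + (k : Int) := by simp [aFuz, hn]
      have hlz : aLuz start cur = start + ((((k :: t).getLast?).getD 0 : Nat) : Int) := by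
        simp [aLuz, hn]
      have h2 : ¬ start + (k : Int) = -1 := by omega
      have h3 : ¬ start + ((((k :: t).getLast?).getD 0 : Nat) : Int) = -1 := by omega
      simp only [pvACands, segPairsI, hn, hf, hlz, hl, hidx, ne_eq, h1, h2, h3,
        not_false_eq_true, if_true, List.cons_append, List.nil_append]

-- invariant preservation: zero step
theorem InvS_zero (seq : List Int) (k : Nat) (segs : List (Int × List Int)) (start : Int)
    (cur : List Int) (hI : InvS seq k (segs, start, cur)) (hk : k < seq.length) :
    InvS seq (k + 1) (altStep (segs, start, cur) ((k : Int), 0)) := by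
  rw [InvS_mk] at hI
  obtain ⟨h0, hkeq, hnz, hcur, hkl, hsegs⟩ := hI
  have hstep : altStep (segs, start, cur) ((k : Int), 0) =
      ((if cur ≠ [] then segs ++ [(start, cur)] else segs), (k : Int) + 1, ([] : List Int)) := by
    simp [altStep]
  rw [hstep, InvS_mk]
  refine ⟨by omega, by simp, by simp, by simp, by omega, ?_⟩
  by_cases hc : cur = []
  · simpa [hc] using hsegs
  · simp only [ne_eq, hc, not_false_eq_true, if_true]
    intro p hp
    rcases List.mem_append.mp hp with h | h
    · exact hsegs p h
    · have hpe : p = (start, cur) := by simpa using h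
      subst hpe
      rw [SegOK_mk]
      exact ⟨h0, hc, hnz, hcur, by omega⟩

-- invariant preservation: nonzero step
theorem InvS_push (seq : List Int) (k : Nat) (segs : List (Int × List Int)) (start : Int)
    (cur : List Int) (x : Int) (hI : InvS seq k (segs, start, cur)) (hx : seq[k]? = some x)
    (hx0 : x ≠ 0) :
    InvS seq (k + 1) (altStep (segs, start, cur) ((k : Int), x)) := by
  rw [InvS_mk] at hI
  obtain ⟨h0, hkeq, hnz, hcur, hkl, hsegs⟩ := hI
  have hklen : k < seq.length := by
    rcases List.getElem?_eq_some_iff.mp hx with ⟨h, _⟩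
    exact h
  have hstep : altStep (segs, start, cur) ((k : Int), x) = (segs, start, cur ++ [x]) := by
    simp [altStep, hx0]
  rw [hstep, InvS_mk]
  refine ⟨h0, by simp; omega, ?_, ?_, by omega, hsegs⟩
  · intro v hv
    rcases List.mem_append.mp hv with h | h
    · exact hnz v h
    · have hvx : v = x := by simpa using h
      rw [hvx]; exact hx0
  · simp only [List.length_append, List.length_cons, List.length_nil, Nat.zero_add]
    rw [List.take_add_one, ← hcur]
    have hg : (seq.drop start.toNat)[cur.length]? = some x := by
      rw [List.getElem?_drop, hkeq, hx]
    rw [hg]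
    rfl

-- one A-step mirrors one segmentation step
theorem step_mirror (seq : List Int) (k : Nat) (segs : List (Int × List Int)) (start : Int)
    (cur : List Int) (x : Int) (hI : InvS seq k (segs, start, cur)) :
    solutionStep (aMirror (segs, start, cur)) ((k : Int), x) =
      aMirror (altStep (segs, start, cur) ((k : Int), x)) := by
  rw [InvS_mk] at hI
  obtain ⟨h0, hkeq, hnz, hcur, hkl, hsegs⟩ := hI
  have hidx : (k : Int) = start + cur.length := by omega
  by_cases hx0 : x = 0
  · subst hx0
    have hA : solutionStep (aMirror (segs, start, cur)) ((k : Int), 0) =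
        (segFlat segs ++ pvACands (aL start cur) (aFuz start cur) (aLuz start cur) (k : Int),
          -1, -1, -1) := by
      simp [solutionStep, aMirror]
    have hB : altStep (segs, start, cur) ((k : Int), 0) =
        ((if cur ≠ [] then segs ++ [(start, cur)] else segs), (k : Int) + 1, ([] : List Int)) := by
      simp [altStep]
    rw [hA, hB]
    have hM : aMirror ((if cur ≠ [] then segs ++ [(start, cur)] else segs), (k : Int) + 1,
        ([] : List Int)) =
        (segFlat (if cur ≠ [] then segs ++ [(start, cur)] else segs), -1, -1, -1) := rfl
    rw [hM, pvACands_close start cur (k : Int) h0 hidx]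
    by_cases hc : cur = []
    · simp [hc]
    · simp [hc, segFlat, List.flatMap_append]
  · have hA : solutionStep (aMirror (segs, start, cur)) ((k : Int), x) =
        (segFlat segs,
          (if aL start cur = -1 then (k : Int) else aL start cur),
          (if x < 0 then (if aFuz start cur = -1 then (k : Int) else aFuz start cur)
            else aFuz start cur),
          (if x < 0 then (k : Int) else aLuz start cur)) := by
      simp [solutionStep, aMirror, hx0]
    have hB : altStep (segs, start, cur) ((k : Int), x) = (segs, start, cur ++ [x]) := by
      simp [altStep, hx0]
    rw [hA, hB]
    have hl' : (if aL start cur = -1 then (k : Int) else aL start cur) =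
        aL start (cur ++ [x]) := by
      have happ : aL start (cur ++ [x]) = start := by simp [aL]
      rw [happ]
      by_cases hc : cur = []
      · have hnil : aL start cur = -1 := by simp [aL, hc]
        rw [hnil, if_pos rfl]
        subst hc
        simp at hidx
        omega
      · have hcons : aL start cur = start := by simp [aL, hc]
        rw [hcons, if_neg (by omega)]
    have hf' : (if x < 0 then (if aFuz start cur = -1 then (k : Int) else aFuz start cur)
        else aFuz start cur) = aFuz start (cur ++ [x]) := by
      by_cases hneg : x < 0
      · rw [if_pos hneg]
        rcases hn : negPos cur with _ | ⟨k', t⟩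
        · have hfn : aFuz start cur = -1 := by simp [aFuz, hn]
          rw [hfn, if_pos rfl]
          have hng : negPos (cur ++ [x]) = [cur.length] := by
            rw [negPos_concat, hn, if_pos hneg]
            rfl
          simp only [aFuz, hng]
          omega
        · have hfn : aFuz start cur = start + (k' : Int) := by simp [aFuz, hn]
          have hng : negPos (cur ++ [x]) = k' :: (t ++ [cur.length]) := by
            rw [negPos_concat, hn, if_pos hneg]
            rfl
          rw [hfn, if_neg (by omega)]
          simp [aFuz, hng]
      · rw [if_neg hneg]
        have hng : negPos (cur ++ [x]) = negPos cur := by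
          rw [negPos_concat, if_neg hneg]
          simp
        simp [aFuz, hng]
    have hz' : (if x < 0 then (k : Int) else aLuz start cur) = aLuz start (cur ++ [x]) := by
      by_cases hneg : x < 0
      · rw [if_pos hneg]
        rcases hn : negPos cur with _ | ⟨k', t⟩
        · have hng : negPos (cur ++ [x]) = [cur.length] := by
            rw [negPos_concat, hn, if_pos hneg]
            rfl
          simp only [aLuz, hng]
          simp
          omega
        · have hng : negPos (cur ++ [x]) = k' :: (t ++ [cur.length]) := by
            rw [negPos_concat, hn, if_pos hneg]
            rfl
          have hlast : ((k' :: (t ++ [cur.length])).getLast?) = some cur.length := by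
            rw [← List.cons_append]
            exact List.getLast?_concat ..
          simp only [aLuz, hng, hlast, Option.getD_some]
          omega
      · rw [if_neg hneg]
        have hng : negPos (cur ++ [x]) = negPos cur := by
          rw [negPos_concat, if_neg hneg]
          simp
        simp [aLuz, hng]
    rw [hl', hf', hz']
    rfl

-- the coupled induction: A's first loop is the mirror of the segmentation loop
theorem couple (seq : List Int) :
    ∀ (rest : List Int) (k : Nat) (st : (List (Int × List Int)) × Int × List Int),
      seq.drop k = rest → InvS seq k st →
      (PySem.List.enumerate rest (k : Int)).foldl solutionStep (aMirror st) =
          aMirror ((PySem.List.enumerate rest (k : Int)).foldl altStep st) ∧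
        InvS seq (k + rest.length) ((PySem.List.enumerate rest (k : Int)).foldl altStep st) := by
  intro rest
  induction rest with
  | nil =>
    intro k st hd hI
    simp only [PySem.List.enumerate_nil, List.foldl_nil, List.length_nil, Nat.add_zero]
    exact ⟨trivial, hI⟩
  | cons x rest ih =>
    intro k st hd hI
    obtain ⟨segs, start, cur⟩ := st
    have hklen : k < seq.length := by
      have := congrArg List.length hd
      simp at this
      omega
    have hxk : seq[k]? = some x := by
      have h0' : (seq.drop k)[0]? = some x := by rw [hd]; rfl
      rw [List.getElem?_drop] at h0'
      simpa using h0'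
    have hd' : seq.drop (k + 1) = rest := by
      have h1 : (seq.drop k).drop 1 = seq.drop (k + 1) := List.drop_drop
      rw [hd] at h1
      simpa using h1.symm
    rw [PySem.List.enumerate_cons, List.foldl_cons, List.foldl_cons]
    have hcast : (k : Int) + 1 = ((k + 1 : Nat) : Int) := by push_cast; ring
    have hstep := step_mirror seq k segs start cur x hI
    have hI' : InvS seq (k + 1) (altStep (segs, start, cur) ((k : Int), x)) := by
      by_cases hx0 : x = 0
      · subst hx0; exact InvS_zero seq k segs start cur hI hklen
      · exact InvS_push seq k segs start cur x hI hxk hx0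
    rw [hstep, hcast]
    have hres := ih (k + 1) (altStep (segs, start, cur) ((k : Int), x)) hd' hI'
    have harith : k + (x :: rest).length = (k + 1) + rest.length := by simp; omega
    rw [harith]
    exact hres

theorem tpl_char (seq : List Int) :
    solutionTpl seq = segFlat (altSegs seq) ∧ ∀ p ∈ altSegs seq, SegOK seq p := by
  have hI0 : InvS seq 0 ([], 0, []) := by
    rw [InvS_mk]
    refine ⟨by omega, by simp, by simp, by simp, by omega, by simp⟩
  have hc := couple seq seq 0 ([], 0, []) (by simp) hI0
  rw [show ((0 : Nat) : Int) = (0 : Int) from rfl] at hc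
  obtain ⟨heq, hInv⟩ := hc
  rw [show aMirror ([], 0, ([] : List Int)) = ([], -1, -1, -1) from rfl] at heq
  set stB := (PySem.List.enumerate seq 0).foldl altStep ([], 0, ([] : List Int)) with hstB
  unfold InvS at hInv
  obtain ⟨h0, hkeq, hnz, hcur, hkl, hsegs⟩ := hInv
  simp only [Nat.zero_add] at hkeq
  have hidx : ((seq.length : Nat) : Int) = stB.2.1 + stB.2.2.length := by omega
  constructor
  · simp only [solutionTpl, altSegs, finishSegs]
    rw [← hstB, heq]
    show segFlat stB.1 ++ pvACands (aL stB.2.1 stB.2.2) (aFuz stB.2.1 stB.2.2)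
      (aLuz stB.2.1 stB.2.2) ((seq.length : Nat) : Int) = _
    rw [pvACands_close stB.2.1 stB.2.2 _ h0 hidx]
    by_cases hc2 : stB.2.2 = []
    · simp [hc2]
    · simp only [ne_eq, hc2, not_false_eq_true, if_true]
      simp [segFlat, List.flatMap_append]
  · intro p hp
    simp only [altSegs, finishSegs] at hp
    rw [← hstB] at hp
    by_cases hc2 : stB.2.2 = []
    · simp [hc2] at hp
      exact hsegs p hp
    · simp only [ne_eq, hc2, not_false_eq_true, if_true] at hp
      rcases List.mem_append.mp hp with h | h
      · exact hsegs p h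
      · have hpe : p = (stB.2.1, stB.2.2) := by simpa using h
        subst hpe
        rw [SegOK_mk]
        exact ⟨h0, hc2, hnz, hcur, by omega⟩

def castSegs (l : List (Nat × List Int)) : List (Int × List Int) :=
  l.map (fun p => ((p.1 : Int), p.2))

-- the segmentation loop computes exactly segsFrom
theorem bridge (seq : List Int) :
    ∀ (rest : List Int) (k : Nat) (segs : List (Int × List Int)) (start : Int)
      (cur : List Int),
      seq.drop k = rest → (cur = [] → start = (k : Int)) →
      finishSegs ((PySem.List.enumerate rest (k : Int)).foldl altStep (segs, start, cur)) =
        (if cur = [] then segs ++ castSegs (segsFrom seq k)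
         else segs ++ [(start, cur ++ (seq.drop k).takeWhile (fun v => v != 0))] ++
           castSegs (segsFrom seq (k + ((seq.drop k).takeWhile (fun v => v != 0)).length))) := by
  intro rest
  induction rest with
  | nil =>
    intro k segs start cur hd hs
    have hk : seq.length ≤ k := by
      have := congrArg List.length hd
      simp at this
      omega
    have hsf : segsFrom seq k = [] := by
      rw [segsFrom, dif_neg (by omega)]
    simp only [PySem.List.enumerate_nil, List.foldl_nil, finishSegs, hsf]
    by_cases hc : cur = []
    · simp [hc, castSegs]
    · simp [hc, castSegs, hd, hsf]
  | cons x rest ih =>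
    intro k segs start cur hd hs
    have hklen : k < seq.length := by
      have := congrArg List.length hd
      simp at this
      omega
    have hxk : seq[k]? = some x := by
      have h0' : (seq.drop k)[0]? = some x := by rw [hd]; rfl
      rw [List.getElem?_drop] at h0'
      simpa using h0'
    have hgd : seq.getD k 0 = x := by
      rw [List.getD_eq_getElem?_getD, hxk]
      rfl
    have hd' : seq.drop (k + 1) = rest := by
      have h1 : (seq.drop k).drop 1 = seq.drop (k + 1) := List.drop_drop
      rw [hd] at h1
      simpa using h1.symm
    rw [PySem.List.enumerate_cons, List.foldl_cons]
    have hcast : (k : Int) + 1 = ((k + 1 : Nat) : Int) := by push_cast; ring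
    by_cases hx0 : x = 0
    · subst hx0
      have hstep : altStep (segs, start, cur) ((k : Int), 0) =
          ((if cur ≠ [] then segs ++ [(start, cur)] else segs), (k : Int) + 1,
            ([] : List Int)) := by
        simp [altStep]
      rw [hstep, hcast]
      rw [ih (k + 1) _ (((k + 1 : Nat) : Int)) [] hd' (fun _ => rfl)]
      have htw : (seq.drop k).takeWhile (fun v => v != 0) = [] := by
        rw [hd]
        simp
      have hsf : segsFrom seq k = segsFrom seq (k + 1) := by
        rw [segsFrom, dif_pos hklen, dif_pos hgd]
      simp only []
      by_cases hc : cur = []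
      · simp [hc, hsf]
      · simp only [ne_eq, hc, not_false_eq_true, if_true, htw,
          List.append_nil, List.length_nil, Nat.add_zero, hsf, List.append_assoc,
          List.cons_append, List.nil_append]
        simp
    · have hstep : altStep (segs, start, cur) ((k : Int), x) = (segs, start, cur ++ [x]) := by
        simp [altStep, hx0]
      rw [hstep, hcast]
      rw [ih (k + 1) segs start (cur ++ [x]) hd' (by simp)]
      have hcx : cur ++ [x] ≠ [] := by simp
      rw [if_neg hcx]
      have htw : (seq.drop k).takeWhile (fun v => v != 0) =
          x :: (seq.drop (k + 1)).takeWhile (fun v => v != 0) := by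
        conv_lhs => rw [hd]
        rw [hd']
        simp [hx0]
      by_cases hc : cur = []
      · subst hc
        have hstart := hs rfl
        rw [if_pos rfl]
        have hsf : segsFrom seq k = (k, (seq.drop k).takeWhile (fun v => v != 0)) ::
            segsFrom seq (k + ((seq.drop k).takeWhile (fun v => v != 0)).length) := by
          rw [segsFrom, dif_pos hklen, dif_neg (by rw [hgd]; exact hx0)]
        rw [hsf, htw]
        simp only [castSegs, List.map_cons, hstart, List.nil_append, List.length_cons]
        rw [show k + (((seq.drop (k+1)).takeWhile (fun v => v != 0)).length + 1) =
          (k + 1) + ((seq.drop (k+1)).takeWhile (fun v => v != 0)).length from by omega]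
        simp [List.append_assoc]
      · rw [if_neg hc, htw]
        simp only [List.length_cons, List.append_assoc, List.cons_append, List.nil_append]
        rw [show k + (((seq.drop (k+1)).takeWhile (fun v => v != 0)).length + 1) =
          (k + 1) + ((seq.drop (k+1)).takeWhile (fun v => v != 0)).length from by omega]

theorem altSegs_eq (seq : List Int) : altSegs seq = castSegs (segsFrom seq 0) := by
  have h := bridge seq seq 0 [] 0 [] (by simp) (fun _ => rfl)
  simpa [altSegs] using h

-- A's inner product over range(a, b) is the product of the corresponding sublist
theorem crt_eq (seq : List Int) (a b : Int) (h0 : 0 ≤ a) (hab : a ≤ b)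
    (hb : b ≤ (seq.length : Int)) :
    solutionCrt seq a (b - 1) =
      ((seq.drop a.toNat).take (b.toNat - a.toNat)).foldl (fun p v => p * v) 1 := by
  unfold solutionCrt
  rw [show b - 1 + 1 = b from by ring]
  have hlen : ((seq.take b.toNat).length : Int) = b := by
    simp only [List.length_take]
    omega
  have hcong : (PySem.List.pyRange a b 1).foldl (fun c i => c * PySem.List.pyGetD seq i 0) 1 =
      (PySem.List.pyRange a b 1).foldl
        (fun c i => c * PySem.List.pyGetD (seq.take b.toNat) i 0) 1 := by
    apply PySem.List.foldl_congr_mem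
    intro acc i hi
    obtain ⟨hi0, hib⟩ := (PySem.List.mem_pyRange_one).mp hi
    rw [PySem.List.pyGetD_eq_getElem seq 0 (by omega) (by omega),
        PySem.List.pyGetD_eq_getElem (seq.take b.toNat) 0 (by omega)
          (by simp only [List.length_take]; omega)]
    rw [List.getElem_take]
  rw [hcong]
  have hfold := PySem.List.foldl_pyRange_pyGetD' (seq.take b.toNat) 0
    (fun p v => p * v) 1 (a := a) h0
  rw [hlen] at hfold
  rw [hfold, List.drop_take]

-- each emitted candidate's stored product is what A's re-scan computes on its interval
theorem segCandsB_crt (seq : List Int) (s : Nat) (vals : List Int)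
    (hok : SegOK seq ((s : Int), vals)) :
    ∀ c ∈ segCandsB s vals, solutionCrt seq c.2.1 c.2.2 = c.1 := by
  rw [SegOK_mk] at hok
  obtain ⟨h0, hne, hnz, hval, hbound⟩ := hok
  simp only [Int.toNat_natCast] at hval hbound
  have hfull : solutionCrt seq (s : Int) ((s : Int) + (vals.length : Int) - 1) = vals.prod := by
    have h := crt_eq seq (s : Int) ((s : Int) + (vals.length : Int)) (by omega) (by omega)
      (by omega)
    rw [h, show ((s : Int) + (vals.length : Int)).toNat - (s : Int).toNat = vals.length from
      by omega]
    simp only [Int.toNat_natCast]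
    rw [← hval, prodFold]
  intro c hc
  rcases hn : negPos vals with _ | ⟨k, t⟩
  · rw [segCandsB, hn] at hc
    simp only [List.mem_cons, List.not_mem_nil, or_false] at hc
    subst hc
    exact hfull
  · have hkm : k < vals.length := negPos_lt_length (by rw [hn]; exact List.mem_cons_self ..)
    obtain ⟨m, hm⟩ : ∃ m, (k :: t).getLast? = some m :=
      ⟨(k :: t).getLast (List.cons_ne_nil k t), List.getLast?_eq_some_getLast ..⟩
    have hmmem : m ∈ negPos vals := by
      rw [hn]
      exact List.mem_of_getLast? hm
    have hmlt : m < vals.length := negPos_lt_length hmmem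
    rw [segCandsB, hn] at hc
    simp only [hm, Option.getD_some, List.mem_cons, List.not_mem_nil, or_false] at hc
    rcases hc with hc | hc | hc
    · subst hc
      exact hfull
    · subst hc
      dsimp only
      have h := crt_eq seq ((s : Int) + (k : Int) + 1) ((s : Int) + (vals.length : Int))
        (by omega) (by omega) (by omega)
      rw [show (s : Int) + (vals.length : Int) - 1 =
        (s : Int) + (vals.length : Int) - 1 from rfl] at h
      rw [h]
      have hdrop : (seq.drop ((s : Int) + (k : Int) + 1).toNat).take
          (((s : Int) + (vals.length : Int)).toNat - ((s : Int) + (k : Int) + 1).toNat) =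
          vals.drop (k + 1) := by
        conv_rhs => rw [hval]
        rw [List.drop_take, List.drop_drop]
        congr 1
        omega
      rw [hdrop, prodFold]
      have hsplit : (vals.take (k + 1)).prod * (vals.drop (k + 1)).prod = vals.prod :=
        List.prod_take_mul_prod_drop vals (k + 1)
      have htne : (vals.take (k + 1)).prod ≠ 0 :=
        List.prod_ne_zero (fun hmem => hnz 0 (List.mem_of_mem_take hmem) rfl)
      have hdiv : PySem.Int.floordiv vals.prod (vals.take (k + 1)).prod =
          (vals.drop (k + 1)).prod := by
        rw [← hsplit]
        show Int.fdiv ((vals.take (k + 1)).prod * (vals.drop (k + 1)).prod)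
          ((vals.take (k + 1)).prod) = _
        exact Int.mul_fdiv_cancel_left _ htne
      exact hdiv.symm
    · subst hc
      dsimp only
      have h := crt_eq seq (s : Int) ((s : Int) + (m : Int)) (by omega) (by omega) (by omega)
      rw [h]
      have htake : (seq.drop (s : Int).toNat).take
          (((s : Int) + (m : Int)).toNat - (s : Int).toNat) = vals.take m := by
        conv_rhs => rw [hval]
        rw [List.take_take]
        congr 1
        omega
      rw [htake, prodFold]

-- ===== B-side: the fused scan =====

-- full characterization of the inner scan over a zero-free run
theorem scanSeg_char (seq : List Int) :
    ∀ (vals : List Int) (fuel j : Nat) (p fi fprod li lprod : Int),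
      vals.length ≤ fuel →
      seq.drop j = vals ++ seq.drop (j + vals.length) →
      (∀ v ∈ vals, v ≠ 0) →
      (j + vals.length = seq.length ∨ seq.getD (j + vals.length) 0 = 0) →
      scanSeg seq fuel j p fi fprod li lprod =
        (j + vals.length, p * vals.prod,
         (if fi = -1 then
            (match negPos vals with | [] => (-1 : Int) | k :: _ => (j : Int) + (k : Int))
          else fi),
         (if fi = -1 then
            (match negPos vals with
             | [] => fprod
             | k :: _ => p * (vals.take (k + 1)).prod)
          else fprod),
         (match (negPos vals).getLast? with
          | none => li
          | some m => (j : Int) + (m : Int)),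
         (match (negPos vals).getLast? with
          | none => lprod
          | some m => p * (vals.take m).prod)) := by
  intro vals
  induction vals with
  | nil =>
    intro fuel j p fi fprod li lprod hfl h1 h2 h3
    have hcond : ¬ (j < seq.length ∧ seq.getD j 0 ≠ 0) := by
      simp only [List.length_nil, Nat.add_zero] at h3
      rcases h3 with h | h
      · omega
      · intro hcon; exact hcon.2 h
    cases fuel with
    | zero => simp [scanSeg, negPos, mul_one]
    | succ f =>
      rw [scanSeg, if_neg hcond]
      simp [negPos, mul_one]
  | cons x t ih =>
    intro fuel j p fi fprod li lprod hfl h1 h2 h3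
    obtain ⟨f, rfl⟩ : ∃ f, fuel = f + 1 := by
      cases fuel with
      | zero => simp at hfl
      | succ f => exact ⟨f, rfl⟩
    have hx0 : x ≠ 0 := h2 x (List.mem_cons_self ..)
    have hjlen : j < seq.length := by
      have := congrArg List.length h1
      simp at this
      omega
    have hxj : seq[j]? = some x := by
      have h0' : (seq.drop j)[0]? = some x := by rw [h1]; rfl
      rw [List.getElem?_drop] at h0'
      simpa using h0'
    have hgd : seq.getD j 0 = x := by
      rw [List.getD_eq_getElem?_getD, hxj]
      rfl
    have hd' : seq.drop (j + 1) = t ++ seq.drop ((j + 1) + t.length) := by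
      have htl : (seq.drop j).drop 1 = seq.drop (j + 1) := List.drop_drop
      rw [h1] at htl
      simp only [List.cons_append, List.drop_succ_cons, List.drop_zero] at htl
      rw [← htl]
      congr 2
      simp
      omega
    have h3' : (j + 1) + t.length = seq.length ∨ seq.getD ((j + 1) + t.length) 0 = 0 := by
      simp only [List.length_cons] at h3
      rcases h3 with h | h
      · left; omega
      · right; rwa [show j + (t.length + 1) = (j + 1) + t.length from by omega] at h
    rw [scanSeg, if_pos ⟨hjlen, by rw [hgd]; exact hx0⟩]
    dsimp only
    rw [hgd]
    rw [ih f (j + 1) (p * x)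
      (if x < 0 ∧ fi = -1 then (j : Int) else fi)
      (if x < 0 ∧ fi = -1 then p * x else fprod)
      (if x < 0 then (j : Int) else li)
      (if x < 0 then p else lprod)
      (by simp at hfl; omega)
      hd' (fun v hv => h2 v (List.mem_cons_of_mem _ hv)) h3']
    have hlen : (j + 1) + t.length = j + (x :: t).length := by simp; omega
    have hprod : (p * x) * t.prod = p * (x :: t).prod := by
      rw [List.prod_cons, mul_assoc]
    by_cases hneg : x < 0
    · have hnp : negPos (x :: t) = 0 :: (negPos t).map (· + 1) := by
        simp [negPos, hneg]
      refine congrArg₂ Prod.mk (by omega) (congrArg₂ Prod.mk hprod ?_)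
      have hfi' : (if x < 0 ∧ fi = -1 then (j : Int) else fi) =
          (if fi = -1 then (j : Int) else fi) := by simp [hneg]
      have hfp' : (if x < 0 ∧ fi = -1 then p * x else fprod) =
          (if fi = -1 then p * x else fprod) := by simp [hneg]
      rw [hfi', hfp']
      refine congrArg₂ Prod.mk ?_ (congrArg₂ Prod.mk ?_ ?_)
      · by_cases hfi : fi = -1
        · have hjne : ((j : Int)) ≠ -1 := by omega
          simp only [hfi, hnp]
          simp
        · simp [hfi]
      · by_cases hfi : fi = -1
        · have hjne : ((j : Int)) ≠ -1 := by omega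
          simp only [hfi, hnp]
          simp
        · simp [hfi]
      · rcases hnt : negPos t with _ | ⟨k', t'⟩
        · have hgl : (negPos (x :: t)).getLast? = some 0 := by
            rw [hnp, hnt]
            rfl
          simp only [hgl, if_pos hneg]
          refine congrArg₂ Prod.mk (by simp) (by simp)
        · obtain ⟨m, hm⟩ : ∃ m, (k' :: t').getLast? = some m :=
            ⟨(k' :: t').getLast (List.cons_ne_nil k' t'), List.getLast?_eq_some_getLast ..⟩
          have hmn : (negPos t).getLast? = some m := by rw [hnt]; exact hm
          have hgl : (negPos (x :: t)).getLast? = some (m + 1) := by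
            rw [hnp, List.getLast?_cons, List.getLast?_map, hmn]
            rfl
          simp only [hm, hgl]
          refine congrArg₂ Prod.mk (by push_cast; ring) ?_
          rw [List.take_succ_cons, List.prod_cons, mul_assoc]
    · have hnp : negPos (x :: t) = (negPos t).map (· + 1) := by
        simp [negPos, hneg]
      refine congrArg₂ Prod.mk (by omega) (congrArg₂ Prod.mk hprod ?_)
      have hfi' : (if x < 0 ∧ fi = -1 then (j : Int) else fi) = fi := by simp [hneg]
      have hfp' : (if x < 0 ∧ fi = -1 then p * x else fprod) = fprod := by simp [hneg]
      rw [hfi', hfp']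
      refine congrArg₂ Prod.mk ?_ (congrArg₂ Prod.mk ?_ ?_)
      · rcases hnt : negPos t with _ | ⟨k', t'⟩
        · simp [hnp, hnt]
        · simp [hnp, hnt]
          ring_nf
      · rcases hnt : negPos t with _ | ⟨k', t'⟩
        · simp [hnp, hnt]
        · simp only [hnp, hnt, List.map_cons]
          by_cases hfi : fi = -1 <;> simp [hfi, List.take_succ_cons, List.prod_cons, mul_assoc]
      · rw [hnp, List.getLast?_map]
        rcases hnt : (negPos t).getLast? with _ | m
        · simp [if_neg hneg]
        · simp only [Option.map_some]
          refine congrArg₂ Prod.mk (by push_cast; ring) ?_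
          rw [List.take_succ_cons, List.prod_cons, mul_assoc]

-- the outer loop folds `consider` over exactly the flattened candidates
theorem solveFrom_eq (seq : List Int) :
    ∀ (fuel i : Nat) (best : Option (Int × Int × Int)), seq.length ≤ i + fuel →
      solveFrom seq fuel i best =
        ((segsFrom seq i).flatMap (fun sv => segCandsB sv.1 sv.2)).foldl consider best := by
  intro fuel
  induction fuel with
  | zero =>
    intro i best hle
    rw [segsFrom, dif_neg (by omega)]
    rfl
  | succ fuel ih =>
    intro i best hle
    by_cases hi : i < seq.length
    · by_cases hz : seq.getD i 0 = 0
      · rw [solveFrom, if_pos hi, if_pos hz, segsFrom, dif_pos hi, dif_pos hz]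
        exact ih (i + 1) best (by omega)
      · rw [segsFrom, dif_pos hi, dif_neg hz]
        set vals := (seq.drop i).takeWhile (fun v => v != 0) with hvals
        have h2 : ∀ v ∈ vals, v ≠ 0 := fun v hv => by
          have := List.mem_takeWhile_imp hv
          simpa using this
        have hsplit : vals ++ (seq.drop i).dropWhile (fun v => v != 0) = seq.drop i :=
          List.takeWhile_append_dropWhile
        have hdw : seq.drop (i + vals.length) = (seq.drop i).dropWhile (fun v => v != 0) := by
          have hdd : (seq.drop i).drop vals.length = seq.drop (i + vals.length) :=
            List.drop_drop
          rw [← hdd]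
          conv_lhs => rw [← hsplit]
          rw [List.drop_left]
        have h1 : seq.drop i = vals ++ seq.drop (i + vals.length) := by rw [hdw, hsplit]
        have h3 : i + vals.length = seq.length ∨ seq.getD (i + vals.length) 0 = 0 := by
          rcases hcase : (seq.drop i).dropWhile (fun v => v != 0) with _ | ⟨y, ys⟩
          · left
            have hnil : seq.drop (i + vals.length) = [] := by rw [hdw, hcase]
            have h5 : seq.length ≤ i + vals.length := List.drop_eq_nil_iff.mp hnil
            have h6 : vals.length ≤ (seq.drop i).length := by
              conv_rhs => rw [h1]
              simp
            rw [List.length_drop] at h6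
            omega
          · right
            have hy : y = 0 := by
              have hh := List.head?_dropWhile_not (fun v => v != 0) (seq.drop i)
              rw [hcase] at hh
              simpa using hh
            have hg : seq[i + vals.length]? = some y := by
              have h0' : (seq.drop (i + vals.length))[0]? = some y := by rw [hdw, hcase]; rfl
              rw [List.getElem?_drop] at h0'
              simpa using h0'
            rw [List.getD_eq_getElem?_getD, hg, hy]
            rfl
        have hfl : vals.length ≤ seq.length - i := by
          have h6 : vals.length ≤ (seq.drop i).length := by
            conv_rhs => rw [h1]
            simp
          rw [List.length_drop] at h6
          exact h6
        have hpos : 0 < vals.length := takeWhile_pos seq i hi hz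
        have hscan := scanSeg_char seq vals (seq.length - i) i 1 (-1) 1 (-1) 1 hfl h1 h2 h3
        have ihx := fun b => ih (i + vals.length) b (by omega)
        rw [solveFrom, if_pos hi, if_neg hz]
        dsimp only
        rw [List.flatMap_cons, List.foldl_append]
        rcases hn : negPos vals with _ | ⟨k, t⟩
        · rw [hn] at hscan
          norm_num at hscan
          rw [hscan]
          dsimp only
          rw [ihx]
          congr 1
          rw [if_neg (by norm_num)]
          simp only [segCandsB, hn, List.foldl_cons, List.foldl_nil]
          congr 1
        · obtain ⟨m, hm⟩ : ∃ m, (k :: t).getLast? = some m :=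
            ⟨(k :: t).getLast (List.cons_ne_nil k t), List.getLast?_eq_some_getLast ..⟩
          rw [hn, hm] at hscan
          norm_num at hscan
          rw [hscan]
          dsimp only
          rw [ihx]
          congr 1
          rw [if_pos (show (i : Int) + (k : Int) ≠ -1 by intro hcon; omega)]
          rw [show ((i + vals.length : Nat) : Int) = (i : Int) + (vals.length : Int) from
            by push_cast; ring]
          simp only [segCandsB, hn, hm, Option.getD_some, List.foldl_cons, List.foldl_nil]
    · rw [solveFrom, if_neg hi, segsFrom, dif_neg hi]
      rfl

theorem consider_some (ts : List (Int × Int × Int)) :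
    ∀ b, ts.foldl consider (some b) =
      some (ts.foldl (fun best c => if best.1 < c.1 then c else best) b) := by
  induction ts with
  | nil => intro b; rfl
  | cons t ts ih =>
    intro b
    have hstep : consider (some b) t = some (if b.1 < t.1 then t else b) := by
      by_cases hb : b.1 < t.1 <;> simp [consider, hb]
    rw [List.foldl_cons, List.foldl_cons, hstep]
    by_cases hb : b.1 < t.1
    · simp only [if_pos hb]; exact ih t
    · simp only [if_neg hb]; exact ih b

-- A's selection loop, started after the first candidate, mirrors B's running max
theorem sel_go (seq : List Int) :
    ∀ (ts : List (Int × Int × Int)) (b : Int × Int × Int),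
      (∀ t ∈ ts, solutionCrt seq t.2.1 t.2.2 = t.1) →
      ts.foldl (fun acc t => solutionSel seq acc t.2) (some b.1, b.2) =
        (some (ts.foldl (fun best c => if best.1 < c.1 then c else best) b).1,
         (ts.foldl (fun best c => if best.1 < c.1 then c else best) b).2) := by
  intro ts
  induction ts with
  | nil => intro b h; rfl
  | cons t ts ih =>
    intro b h
    have ht := h t (List.mem_cons_self ..)
    simp only [List.foldl_cons]
    have hstep : solutionSel seq (some b.1, b.2) t.2 =
        (some (if b.1 < t.1 then t else b).1, (if b.1 < t.1 then t else b).2) := by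
      simp only [solutionSel, ht]
      by_cases hb : b.1 < t.1
      · simp [hb]
      · simp [hb]
    rw [hstep]
    by_cases hb : b.1 < t.1
    · simp only [if_pos hb]
      exact ih t (fun t' ht' => h t' (List.mem_cons_of_mem _ ht'))
    · simp only [if_neg hb]
      exact ih b (fun t' ht' => h t' (List.mem_cons_of_mem _ ht'))

theorem candFlat_props (seq : List Int) :
    solutionTpl seq = (candFlat seq).map (fun c => c.2) ∧
      ∀ c ∈ candFlat seq, solutionCrt seq c.2.1 c.2.2 = c.1 := by
  obtain ⟨htpl, hok⟩ := tpl_char seq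
  have hsegs := altSegs_eq seq
  constructor
  · rw [htpl, hsegs]
    unfold segFlat castSegs candFlat
    rw [List.flatMap_map, List.map_flatMap]
    congr 1
    funext sv
    exact (map_snd_segCandsB sv.1 sv.2).symm
  · intro c hc
    unfold candFlat at hc
    obtain ⟨sv, hsv, hcm⟩ := List.mem_flatMap.mp hc
    have hsok : SegOK seq ((sv.1 : Int), sv.2) := by
      apply hok
      rw [hsegs]
      unfold castSegs
      exact List.mem_map.mpr ⟨sv, hsv, rfl⟩
    exact segCandsB_crt seq sv.1 sv.2 hsok c hcm

theorem solution_eq_alt (seq : List Int) : solution seq = solution_alt seq := by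
  obtain ⟨htpl, hcrt⟩ := candFlat_props seq
  have hB : solveFrom seq seq.length 0 none = (candFlat seq).foldl consider none :=
    solveFrom_eq seq seq.length 0 none (by omega)
  simp only [solution, solution_alt]
  rw [htpl, hB]
  cases hcl : candFlat seq with
  | nil => rfl
  | cons c0 rest =>
    rw [hcl] at hcrt
    have hc0 := hcrt c0 (List.mem_cons_self ..)
    rw [List.map_cons, List.foldl_cons, List.foldl_cons]
    have hfirst : solutionSel seq (none, -1, -1) c0.2 = (some c0.1, c0.2) := by
      simp [solutionSel, hc0]
    have hBfirst : consider none c0 = some c0 := rfl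
    rw [hfirst, hBfirst, List.foldl_map,
      sel_go seq rest c0 (fun t' ht' => hcrt t' (List.mem_cons_of_mem _ ht')),
      consider_some]

-- ===== VERDICT (by name: the statement is the Claim_ definition above) =====
theorem solution_spec : Claim_equal_solution := by
  intro seq _
  unfold Spec_solution
  exact solution_eq_alt seq
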